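-- pv_equiv track=rewrite | github.com/MarissaRuchlin/AoC_2023 | src/day2/day2_problem2.py | calculate_highest_product_per_game
-- ===== SOURCE A (Python) =====
-- def calculate_highest_product_per_game(game_data_list):
--     products = []
--
--     for game_dict in game_data_list:
--         game = list(game_dict.values())[0]
--
--         highest_per_color = {}
--
--         for colors in game:
--             for color, number in colors.items():
--                 if color not in highest_per_color or number > highest_per_color[color]:
--                     highest_per_color[color] = number
--
--         product = 1
--         for number in highest_per_color.values():
--             product *= number
--
--         products.append(product)
--
--     return products
-- ===== SOURCE B (Python) =====
-- def _prod_of_maxes(grouped):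
--     product = 1
--     for counts in grouped.values():
--         product *= max(counts)
--     return product
--
--
-- def _group_by_color(game):
--     by_color = {}
--     for colors in game:
--         for color, number in colors.items():
--             by_color.setdefault(color, []).append(number)
--     return by_color
--
--
-- def calculate_highest_product_per_game(game_data_list):
--     return [_prod_of_maxes(_group_by_color(list(gd.values())[0]))
--             for gd in game_data_list]
-- ===== Notes on version B (the rewrite author's own statement) =====
-- stated objective: alternative
-- what changed: Replaces the running-max dict update inside the scan with a collect pass that groups every observed count per color into lists, followed by a separate max-and-multiply reduce over the grouped lists.
import Mathlib
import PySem

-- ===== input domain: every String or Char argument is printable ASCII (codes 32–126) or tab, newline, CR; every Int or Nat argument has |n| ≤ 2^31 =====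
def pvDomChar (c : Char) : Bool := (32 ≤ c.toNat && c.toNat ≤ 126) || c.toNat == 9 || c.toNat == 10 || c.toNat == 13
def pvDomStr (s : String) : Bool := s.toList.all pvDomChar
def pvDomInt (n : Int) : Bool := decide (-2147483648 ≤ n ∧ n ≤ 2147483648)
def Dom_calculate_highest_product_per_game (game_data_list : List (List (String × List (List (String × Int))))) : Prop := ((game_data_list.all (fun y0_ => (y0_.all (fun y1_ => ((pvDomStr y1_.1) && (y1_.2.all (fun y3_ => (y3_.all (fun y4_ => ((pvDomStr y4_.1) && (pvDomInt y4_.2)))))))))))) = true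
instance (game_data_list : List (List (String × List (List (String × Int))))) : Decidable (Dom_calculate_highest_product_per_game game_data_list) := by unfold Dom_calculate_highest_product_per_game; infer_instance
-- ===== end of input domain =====

-- B replaces A's running-max dict with a collect-then-reduce decomposition: a grouping pass
-- building per-color count lists, then a separate max-and-multiply reduce (same asymptotic cost).


-- ===== PORT A =====
def calculate_highest_product_per_game (game_data_list : List (List (String × List (List (String × Int))))) : List Int :=
  game_data_list.foldl (fun products game_dict =>
    products ++
      [match PySem.List.pyGet? (PySem.Dict.ofList game_dict).values 0 with
       | none => 0  -- Python raises IndexError here (empty dict); excluded by Pre_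
       | some game =>
         (game.foldl (fun h colors =>
             (PySem.Dict.ofList colors).items.foldl (fun h p =>
               if !h.contains p.1 || decide (h.getD p.1 0 < p.2) then h.insert p.1 p.2 else h) h)
           (PySem.Dict.empty : PySem.Dict String Int)).values.foldl (· * ·) 1]) []

-- ===== PORT B =====
def pvGameProduct (game : List (List (String × Int))) : Int :=
  let by_color :=
    game.foldl (fun d colors =>
      (PySem.Dict.ofList colors).items.foldl (fun d p => d.modify p.1 [] (· ++ [p.2])) d)
      (PySem.Dict.empty : PySem.Dict String (List Int))
  -- max(counts): the grouped lists are always nonempty, so the `.getD 0` default is never used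
  by_color.values.foldl (fun product counts => product * (PySem.List.max? counts id).getD 0) 1

def calculate_highest_product_per_game_alt (game_data_list : List (List (String × List (List (String × Int))))) : List Int :=
  game_data_list.map (fun game_dict =>
    match PySem.List.pyGet? (PySem.Dict.ofList game_dict).values 0 with
    | none => 0  -- Python raises IndexError here (empty dict); excluded by Pre_
    | some game => pvGameProduct game)

-- ===== PRECONDITION & SPEC =====
-- Pre_ excludes inputs containing an empty game dict, on which the Python A raises
-- IndexError at `list(game_dict.values())[0]` (and so does B).
def Pre_calculate_highest_product_per_game (game_data_list : List (List (String × List (List (String × Int))))) : Prop :=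
  ∀ gd ∈ game_data_list, gd ≠ []
instance (game_data_list : List (List (String × List (List (String × Int))))) : Decidable (Pre_calculate_highest_product_per_game game_data_list) := by unfold Pre_calculate_highest_product_per_game; infer_instance

def pvWitness_calculate_highest_product_per_game : (List (List (String × List (List (String × Int))))) :=
  [[("Game 1", [[("red", 2), ("blue", 3)], [("red", 5)]])]]

def Spec_calculate_highest_product_per_game (game_data_list : List (List (String × List (List (String × Int))))) (out : List Int) : Prop := out = calculate_highest_product_per_game_alt game_data_list
instance (game_data_list : List (List (String × List (List (String × Int))))) (out : List Int) : Decidable (Spec_calculate_highest_product_per_game game_data_list out) := by unfold Spec_calculate_highest_product_per_game; infer_instance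

-- ===== CLAIM (what is proved, stated in full; the proofs are below) =====
def Claim_equal_calculate_highest_product_per_game : Prop := ∀ (game_data_list : List (List (String × List (List (String × Int))))), Dom_calculate_highest_product_per_game game_data_list → Pre_calculate_highest_product_per_game game_data_list → Spec_calculate_highest_product_per_game game_data_list (calculate_highest_product_per_game game_data_list)

-- ===== LEMMAS AND PROOFS =====

-- max of a count list, as B computes it
def pvLmax (vs : List Int) : Int := (PySem.List.max? vs id).getD 0

-- A's per-item running-max update
def pvStepA (h : PySem.Dict String Int) (p : String × Int) : PySem.Dict String Int :=
  if !h.contains p.1 || decide (h.getD p.1 0 < p.2) then h.insert p.1 p.2 else h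

-- B's per-item grouping update
def pvStepB (d : PySem.Dict String (List Int)) (p : String × Int) : PySem.Dict String (List Int) :=
  d.modify p.1 [] (· ++ [p.2])

-- the relation the two scans maintain: B's dict has nodup keys and nonempty lists,
-- and A's dict is, entry for entry, the max of B's lists
def pvInv (d1 : PySem.Dict String Int) (d2 : PySem.Dict String (List Int)) : Prop :=
  d2.keys.Nodup ∧ (∀ p ∈ d2.items, p.2 ≠ []) ∧
    d1.items = d2.items.map (fun p => (p.1, pvLmax p.2))

lemma pv_max?_cons_isSome : ∀ (l : List Int) (a : Int),
    (PySem.List.max? (a :: l) (id : Int → Int)).isSome := by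
  intro l
  induction l with
  | nil => intro a; rfl
  | cons b l ih =>
    intro a
    simp only [PySem.List.max?, List.foldl_cons] at ih ⊢
    split
    · exact ih b
    · exact ih a

lemma pv_max?_isSome (vs : List Int) (h : vs ≠ []) :
    (PySem.List.max? vs (id : Int → Int)).isSome := by
  cases vs with
  | nil => exact absurd rfl h
  | cons a l => exact pv_max?_cons_isSome l a

lemma pvLmax_append_singleton (vs : List Int) (n : Int) (h : vs ≠ []) :
    pvLmax (vs ++ [n]) = if pvLmax vs < n then n else pvLmax vs := by
  obtain ⟨m, hm⟩ := Option.isSome_iff_exists.mp (pv_max?_isSome vs h)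
  simp only [pvLmax, PySem.List.max?, List.foldl_append] at *
  rw [hm]
  by_cases hlt : m < n <;> simp [hlt]

lemma pv_mem_items_unique {ν : Type} (d : PySem.Dict String ν) (hnd : d.keys.Nodup)
    {k : String} {a b : ν} (ha : (k, a) ∈ d.items) (hb : (k, b) ∈ d.items) : a = b := by
  have h1 := (PySem.Dict.get?_eq_some_iff_mem_items d k a hnd).mpr ha
  have h2 := (PySem.Dict.get?_eq_some_iff_mem_items d k b hnd).mpr hb
  rw [h1] at h2; exact (Option.some.injEq _ _).mp h2

lemma pv_inv_step (d1 : PySem.Dict String Int) (d2 : PySem.Dict String (List Int))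
    (p : String × Int) (h : pvInv d1 d2) : pvInv (pvStepA d1 p) (pvStepB d2 p) := by
  obtain ⟨hnd, hne, hitems⟩ := h
  have hkeys : d1.keys = d2.keys := by
    simp [PySem.Dict.keys, hitems, Function.comp]
  have hcont : d1.contains p.1 = d2.contains p.1 := by
    rw [PySem.Dict.contains_eq_decide_mem_keys, PySem.Dict.contains_eq_decide_mem_keys, hkeys]
  have hnd1 : d1.keys.Nodup := by rw [hkeys]; exact hnd
  by_cases hc : d2.contains p.1 = true
  · -- key present: d2 holds some nonempty vs, d1 holds pvLmax vs
    obtain ⟨vs, hvs⟩ : ∃ vs, d2.get? p.1 = some vs := by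
      have := PySem.Dict.contains_eq_isSome_get? d2 p.1
      rw [hc] at this
      exact Option.isSome_iff_exists.mp this.symm
    have hvmem : (p.1, vs) ∈ d2.items := (PySem.Dict.get?_eq_some_iff_mem_items d2 p.1 vs hnd).mp hvs
    have hvsne : vs ≠ [] := hne _ hvmem
    have hgd2 : d2.getD p.1 [] = vs := PySem.Dict.getD_of_mem_items d2 hvmem hnd []
    have h1mem : (p.1, pvLmax vs) ∈ d1.items := by
      rw [hitems]; exact List.mem_map.mpr ⟨(p.1, vs), hvmem, rfl⟩
    have hgd1 : d1.getD p.1 0 = pvLmax vs := PySem.Dict.getD_of_mem_items d1 h1mem hnd1 0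
    have hitems2 : (pvStepB d2 p).items
        = d2.items.map (fun q => if q.1 == p.1 then (p.1, vs ++ [p.2]) else q) := by
      simp only [pvStepB, PySem.Dict.modify, hgd2]
      exact PySem.Dict.items_insert_of_contains d2 _ hc
    have hkeys2 : (pvStepB d2 p).keys = d2.keys := by
      simp only [PySem.Dict.keys, hitems2, List.map_map]
      apply List.map_congr_left
      intro q _
      by_cases hq : q.1 == p.1 <;> simp_all [Function.comp]
    have hvs_eq : ∀ q ∈ d2.items, q.1 = p.1 → q.2 = vs := by
      intro q hq hq1
      exact pv_mem_items_unique d2 hnd (by rw [← hq1]; exact hq) hvmem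
    refine ⟨by rw [hkeys2]; exact hnd, ?_, ?_⟩
    · intro q hq
      rw [hitems2] at hq
      obtain ⟨r, hr, hrq⟩ := List.mem_map.mp hq
      by_cases hrk : r.1 == p.1
      · rw [if_pos hrk] at hrq; subst hrq; simp
      · rw [if_neg hrk] at hrq; subst hrq; exact hne _ hr
    · -- items correspondence after the step
      by_cases hlt : pvLmax vs < p.2
      · have hstep : pvStepA d1 p = d1.insert p.1 p.2 := by
          simp [pvStepA, hcont, hc, hgd1, hlt]
        rw [hstep, PySem.Dict.items_insert_of_contains d1 _ (by rw [hcont]; exact hc),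
          hitems, hitems2, List.map_map, List.map_map]
        apply List.map_congr_left
        intro q hq
        by_cases hqk : q.1 == p.1
        · have hq1 : q.1 = p.1 := by simpa using hqk
          have hq2 : q.2 = vs := hvs_eq q hq hq1
          simp [Function.comp, hqk, hq1, hq2, pvLmax_append_singleton vs p.2 hvsne, hlt]
        · simp [Function.comp, hqk]
      · have hstep : pvStepA d1 p = d1 := by
          simp [pvStepA, hcont, hc, hgd1, hlt]
        rw [hstep, hitems, hitems2, List.map_map]
        apply List.map_congr_left
        intro q hq
        by_cases hqk : q.1 == p.1
        · have hq1 : q.1 = p.1 := by simpa using hqk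
          have hq2 : q.2 = vs := hvs_eq q hq hq1
          simp [Function.comp, hqk, hq1, hq2, pvLmax_append_singleton vs p.2 hvsne, hlt]
        · simp [Function.comp, hqk]
  · -- fresh key: both sides append
    have hc2 : d2.contains p.1 = false := by simpa using hc
    have hc1 : d1.contains p.1 = false := by rw [hcont]; exact hc2
    have hgd2 : d2.getD p.1 [] = [] := PySem.Dict.getD_of_not_contains d2 [] hc2
    have hitems2 : (pvStepB d2 p).items = d2.items ++ [(p.1, [p.2])] := by
      simp only [pvStepB, PySem.Dict.modify, hgd2]
      exact PySem.Dict.items_insert_of_not_contains d2 _ hc2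
    refine ⟨?_, ?_, ?_⟩
    · have := PySem.Dict.nodup_keys_insert d2 p.1 ((d2.getD p.1 []) ++ [p.2]) hnd
      simpa [pvStepB, PySem.Dict.modify] using this
    · intro q hq
      rw [hitems2] at hq
      rcases List.mem_append.mp hq with hq | hq
      · exact hne _ hq
      · simp at hq; subst hq; simp
    · have hstep : pvStepA d1 p = d1.insert p.1 p.2 := by
        simp [pvStepA, hc1]
      rw [hstep, PySem.Dict.items_insert_of_not_contains d1 _ hc1, hitems, hitems2]
      simp [pvLmax, PySem.List.max?]

lemma pv_inv_foldl_items (L : List (String × Int)) (d1 : PySem.Dict String Int)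
    (d2 : PySem.Dict String (List Int)) (h : pvInv d1 d2) :
    pvInv (L.foldl pvStepA d1) (L.foldl pvStepB d2) := by
  induction L generalizing d1 d2 with
  | nil => exact h
  | cons p L ih => exact ih _ _ (pv_inv_step d1 d2 p h)

lemma pv_inv_foldl_game (game : List (List (String × Int))) (d1 : PySem.Dict String Int)
    (d2 : PySem.Dict String (List Int)) (h : pvInv d1 d2) :
    pvInv (game.foldl (fun h colors => (PySem.Dict.ofList colors).items.foldl pvStepA h) d1)
          (game.foldl (fun d colors => (PySem.Dict.ofList colors).items.foldl pvStepB d) d2) := by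
  induction game generalizing d1 d2 with
  | nil => exact h
  | cons colors game ih => exact ih _ _ (pv_inv_foldl_items _ d1 d2 h)

lemma pv_game_eq (game : List (List (String × Int))) :
    (game.foldl (fun h colors =>
        (PySem.Dict.ofList colors).items.foldl (fun h p =>
          if !h.contains p.1 || decide (h.getD p.1 0 < p.2) then h.insert p.1 p.2 else h) h)
      (PySem.Dict.empty : PySem.Dict String Int)).values.foldl (· * ·) 1
    = pvGameProduct game := by
  have hinv := pv_inv_foldl_game game PySem.Dict.empty PySem.Dict.empty
    ⟨PySem.Dict.nodup_keys_empty, by simp [PySem.Dict.empty], by simp [PySem.Dict.empty]⟩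
  obtain ⟨_, _, hitems⟩ := hinv
  show (game.foldl (fun h colors => (PySem.Dict.ofList colors).items.foldl pvStepA h)
      PySem.Dict.empty).values.foldl (· * ·) 1 = pvGameProduct game
  simp only [pvGameProduct, PySem.Dict.values, hitems, List.map_map]
  rw [List.foldl_map, List.foldl_map]
  rfl

-- ===== VERDICT (by name: the statement is the Claim_ definition above) =====
theorem calculate_highest_product_per_game_spec : Claim_equal_calculate_highest_product_per_game := by
  intro game_data_list _ _
  unfold Spec_calculate_highest_product_per_game
  unfold calculate_highest_product_per_game calculate_highest_product_per_game_alt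
  simp only [PySem.List.foldl_append_singleton_eq_map, List.nil_append]
  apply List.map_congr_left
  intro gd _
  cases PySem.List.pyGet? (PySem.Dict.ofList gd).values 0 with
  | none => rfl
  | some game => exact pv_game_eq game
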